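-- pv_equiv track=rewrite | github.com/pypi-data/pypi-mirror-400 | packages/warden-core/warden_core-1.8.2-py3-none-any.whl/warden/cleaning/application/llm_cleaning_generator.py | _find_commented_blocks
-- ===== SOURCE A (Python) =====
-- from typing import Any, Dict, List, Optional, Tuple
--
-- def _find_commented_blocks(lines: List[str]) -> List[Tuple[int, int]]:
--     """Find commented code blocks."""
--     blocks = []
--     in_block = False
--     block_start = 0
--
--     for i, line in enumerate(lines):
--         stripped = line.strip()
--         if stripped.startswith("#") and any(
--             keyword in stripped
--             for keyword in ["def ", "class ", "if ", "for ", "while "]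
--         ):
--             if not in_block:
--                 in_block = True
--                 block_start = i
--         elif in_block and not stripped.startswith("#"):
--             blocks.append((block_start, i))
--             in_block = False
--
--     return blocks
-- ===== SOURCE B (Python) =====
-- from typing import List, Tuple
--
-- _KEYWORDS = ["def ", "class ", "if ", "for ", "while "]
--
--
-- def _find_commented_blocks(lines: List[str]) -> List[Tuple[int, int]]:
--     """Find commented code blocks (index-driven scan with an inner comment-run loop)."""
--     blocks = []
--     n = len(lines)
--     i = 0
--     while i < n:
--         stripped = lines[i].strip()
--         if stripped.startswith("#") and any(kw in stripped for kw in _KEYWORDS):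
--             start = i
--             i += 1
--             while i < n and lines[i].strip().startswith("#"):
--                 i += 1
--             if i < n:
--                 blocks.append((start, i))
--                 i += 1
--         else:
--             i += 1
--     return blocks
-- ===== Notes on version B (the rewrite author's own statement) =====
-- stated objective: alternative
-- what changed: Replaces A's boolean in_block/block_start state machine over enumerate with an index-driven outer scan that, on a keyword comment, consumes the whole comment run in an inner while loop and emits the block when the run ends before EOF.
import Mathlib
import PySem

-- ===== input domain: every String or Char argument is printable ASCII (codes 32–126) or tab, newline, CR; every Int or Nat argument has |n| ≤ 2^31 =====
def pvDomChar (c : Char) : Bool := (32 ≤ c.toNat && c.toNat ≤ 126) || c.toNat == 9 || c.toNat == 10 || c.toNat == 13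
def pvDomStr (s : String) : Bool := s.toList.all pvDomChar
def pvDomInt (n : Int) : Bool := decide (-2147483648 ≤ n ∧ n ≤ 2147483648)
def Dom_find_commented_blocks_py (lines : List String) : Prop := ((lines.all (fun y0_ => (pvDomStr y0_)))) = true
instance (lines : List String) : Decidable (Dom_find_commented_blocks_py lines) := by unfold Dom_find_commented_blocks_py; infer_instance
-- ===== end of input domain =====

-- ===== PORT A =====
-- One honest line: B replaces A's in_block flag state machine with an index scan that consumes comment runs in an inner loop; same O(n*m) cost, different decomposition.
-- shared helper: line.strip().startswith("#")
def pvIsComment (line : String) : Bool := PySem.Str.startswith (PySem.Str.strip line) "#"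
-- shared helper: the comment-with-keyword test of both Pythons
def pvIsKwComment (line : String) : Bool :=
  pvIsComment line &&
    (["def ", "class ", "if ", "for ", "while "].any (fun kw => PySem.Str.isIn kw (PySem.Str.strip line)))

-- A's for-loop over enumerate(lines), state (blocks, in_block, block_start)
def pvAGo : List String → Int → List (Int × Int) → Bool → Int → List (Int × Int)
  | [], _, blocks, _, _ => blocks
  | line :: rest, i, blocks, in_block, block_start =>
    if pvIsKwComment line then
      if !in_block then pvAGo rest (i + 1) blocks true i
      else pvAGo rest (i + 1) blocks in_block block_start
    else if in_block && !pvIsComment line then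
      pvAGo rest (i + 1) (blocks ++ [(block_start, i)]) false block_start
    else pvAGo rest (i + 1) blocks in_block block_start

def find_commented_blocks_py (lines : List String) : List (Int × Int) :=
  pvAGo lines 0 [] false 0


-- ===== PORT B =====
-- B's outer while over the index; pvBSkip is the inner while consuming a comment run
mutual
def pvBGo : List String → Int → List (Int × Int)
  | [], _ => []
  | line :: rest, i =>
    if pvIsKwComment line then pvBSkip rest (i + 1) i
    else pvBGo rest (i + 1)

def pvBSkip : List String → Int → Int → List (Int × Int)
  | [], _, _ => []
  | line :: rest, i, start =>
    if pvIsComment line then pvBSkip rest (i + 1) start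
    else (start, i) :: pvBGo rest (i + 1)
end

def find_commented_blocks_py_alt (lines : List String) : List (Int × Int) :=
  pvBGo lines 0


-- ===== PRECONDITION & SPEC =====
def Spec_find_commented_blocks_py (lines : List String) (out : List (Int × Int)) : Prop := out = find_commented_blocks_py_alt lines
instance (lines : List String) (out : List (Int × Int)) : Decidable (Spec_find_commented_blocks_py lines out) := by unfold Spec_find_commented_blocks_py; infer_instance

-- ===== CLAIM (what is proved, stated in full; the proofs are below) =====
def Claim_equal_find_commented_blocks_py : Prop := ∀ (lines : List String), Dom_find_commented_blocks_py lines → Spec_find_commented_blocks_py lines (find_commented_blocks_py lines)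

-- ===== LEMMAS AND PROOFS =====

lemma pvKey : ∀ (rest : List String) (i : Int) (blocks : List (Int × Int)),
    (∀ st : Int, pvAGo rest i blocks false st = blocks ++ pvBGo rest i) ∧
    (∀ st : Int, pvAGo rest i blocks true st = blocks ++ pvBSkip rest i st) := by
  intro rest
  induction rest with
  | nil => intro i blocks; constructor <;> intro st <;> simp [pvAGo, pvBGo, pvBSkip]
  | cons l rest ih =>
    intro i blocks
    by_cases hk : pvIsKwComment l = true
    · have hc : pvIsComment l = true := by
        have := hk; unfold pvIsKwComment at this
        exact (Bool.and_eq_true_iff.mp this).1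
      constructor <;> intro st <;>
        simp [pvAGo, pvBGo, pvBSkip, hk, hc, (ih (i + 1) blocks).2]
    · by_cases hc : pvIsComment l = true
      · constructor <;> intro st <;>
          simp [pvAGo, pvBGo, pvBSkip, hk, hc, (ih (i + 1) blocks).1, (ih (i + 1) blocks).2]
      · constructor <;> intro st
        · simp [pvAGo, pvBGo, hk, hc, (ih (i + 1) blocks).1]
        · simp [pvAGo, pvBSkip, hk, hc, (ih (i + 1) (blocks ++ [(st, i)])).1]

-- ===== VERDICT (by name: the statement is the Claim_ definition above) =====
theorem find_commented_blocks_py_spec : Claim_equal_find_commented_blocks_py := by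
  intro lines _
  unfold Spec_find_commented_blocks_py find_commented_blocks_py find_commented_blocks_py_alt
  simpa using (pvKey lines 0 []).1 0
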